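-- pv_equiv track=rewrite | github.com/sagearbor/dcri-mcp-tools | tools/randomization_generator.py | _assign_sites
-- ===== SOURCE A (Python) =====
-- def _assign_sites(randomization_list: list, site_ids: list) -> list:
--     """Assign subjects to sites."""
--
--     subjects_per_site = len(randomization_list) // len(site_ids)
--     remainder = len(randomization_list) % len(site_ids)
--
--     site_index = 0
--     site_count = 0
--
--     for i, subject in enumerate(randomization_list):
--         subject['site_id'] = site_ids[site_index]
--         site_count += 1
--
--         # Move to next site when quota is reached
--         site_quota = subjects_per_site + (1 if site_index < remainder else 0)
--         if site_count >= site_quota: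
--             site_index += 1
--             site_count = 0
--
--     return randomization_list
-- ===== SOURCE B (Python) =====
-- def _assign_sites(randomization_list: list, site_ids: list) -> list:
--     """Assign subjects to sites (precompute the full site-id table, then zip)."""
--     base, extra = divmod(len(randomization_list), len(site_ids))
--     expanded = []
--     for s, sid in enumerate(site_ids):
--         expanded.extend([sid] * (base + (1 if s < extra else 0)))
--     for subject, sid in zip(randomization_list, expanded):
--         subject['site_id'] = sid
--     return randomization_list
-- ===== Notes on version B (the rewrite author's own statement) =====
-- stated objective: alternative
-- what changed: B precomputes the whole per-site assignment table (base+1 copies for the first remainder sites, base for the rest) and zips it with the subject list, replacing A's single pass that tracks a running site_index/site_count against a per-site quota threshold.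
import Mathlib
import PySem

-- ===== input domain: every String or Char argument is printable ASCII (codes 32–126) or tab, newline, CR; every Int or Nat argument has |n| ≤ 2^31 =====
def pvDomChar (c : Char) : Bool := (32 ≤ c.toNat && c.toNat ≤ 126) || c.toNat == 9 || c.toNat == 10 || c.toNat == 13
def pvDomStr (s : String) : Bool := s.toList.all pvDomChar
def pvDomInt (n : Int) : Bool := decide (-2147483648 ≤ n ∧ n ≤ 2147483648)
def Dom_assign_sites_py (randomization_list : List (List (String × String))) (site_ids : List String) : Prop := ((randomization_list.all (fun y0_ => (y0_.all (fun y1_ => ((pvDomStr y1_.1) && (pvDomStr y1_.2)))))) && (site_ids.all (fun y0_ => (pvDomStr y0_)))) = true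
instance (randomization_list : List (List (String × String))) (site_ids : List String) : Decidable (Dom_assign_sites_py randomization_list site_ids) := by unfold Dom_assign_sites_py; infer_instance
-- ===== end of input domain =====

-- B replaces A's running site_index/site_count quota walk by precomputing the full
-- per-site assignment table and zipping it with the subjects (alternative decomposition, same cost).
-- Both Pythons mutate the subject dicts in place; the equivalence proved here is about the return value.

-- ===== PORT A =====
-- A's loop over enumerate(randomization_list): the index i is unused, so the loop is the
-- structural recursion below over (subject list, site_index, site_count).
-- site_ids[site_index] is ported as List.getD: exact whenever the index is in range, which
-- holds on every input admitted by Pre_ (the proof never relies on the default).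
def assignA_loop (site_ids : List String) (q r : Nat) :
    List (List (String × String)) → Nat → Nat → List (List (String × String))
  | [], _, _ => []
  | subject :: rest, s, c =>
      let subject' := ((PySem.Dict.mk subject).insert "site_id" (site_ids.getD s "")).items
      let c' := c + 1
      let quota := q + (if s < r then 1 else 0)
      if quota ≤ c' then subject' :: assignA_loop site_ids q r rest (s + 1) 0
      else subject' :: assignA_loop site_ids q r rest s c'

def assign_sites_py (randomization_list : List (List (String × String))) (site_ids : List String) : List (List (String × String)) :=
  -- Python raises ZeroDivisionError when site_ids is empty (excluded by Pre_)
  if site_ids.length = 0 then randomization_list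
  else
    assignA_loop site_ids (randomization_list.length / site_ids.length)
      (randomization_list.length % site_ids.length) randomization_list 0 0

-- ===== PORT B =====
def assign_sites_py_alt (randomization_list : List (List (String × String))) (site_ids : List String) : List (List (String × String)) :=
  -- Python raises ZeroDivisionError (divmod) when site_ids is empty (excluded by Pre_)
  if site_ids.length = 0 then randomization_list
  else
    let base := randomization_list.length / site_ids.length
    let extra := randomization_list.length % site_ids.length
    let expanded := (PySem.List.enumerate site_ids 0).flatMap
      (fun p => List.replicate (base + (if p.1 < (extra : Int) then 1 else 0)) p.2)
    List.zipWith (fun subject sid => ((PySem.Dict.mk subject).insert "site_id" sid).items)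
      randomization_list expanded

-- ===== PRECONDITION & SPEC =====
-- Pre_ excludes exactly the inputs where Python A raises: empty site_ids (ZeroDivisionError).
def Pre_assign_sites_py (randomization_list : List (List (String × String))) (site_ids : List String) : Prop := site_ids ≠ []
instance (randomization_list : List (List (String × String))) (site_ids : List String) : Decidable (Pre_assign_sites_py randomization_list site_ids) := by unfold Pre_assign_sites_py; infer_instance

def pvWitness_assign_sites_py : (List (List (String × String))) × List String :=
  ([[("id", "1")], [("id", "2")], [("id", "3")]], ["S1", "S2"])

def Spec_assign_sites_py (randomization_list : List (List (String × String))) (site_ids : List String) (out : List (List (String × String))) : Prop := out = assign_sites_py_alt randomization_list site_ids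
instance (randomization_list : List (List (String × String))) (site_ids : List String) (out : List (List (String × String))) : Decidable (Spec_assign_sites_py randomization_list site_ids out) := by unfold Spec_assign_sites_py; infer_instance

-- ===== CLAIM (what is proved, stated in full; the proofs are below) =====
def Claim_equal_assign_sites_py : Prop := ∀ (randomization_list : List (List (String × String))) (site_ids : List String), Dom_assign_sites_py randomization_list site_ids → Pre_assign_sites_py randomization_list site_ids → Spec_assign_sites_py randomization_list site_ids (assign_sites_py randomization_list site_ids)

-- ===== LEMMAS AND PROOFS =====

-- Proof device: the tail of B's expanded table starting at site s.
def expandFrom (site_ids : List String) (q r : Nat) (s : Nat) : List String :=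
  if _h : s < site_ids.length then
    List.replicate (q + (if s < r then 1 else 0)) (site_ids.getD s "") ++
      expandFrom site_ids q r (s + 1)
  else []
termination_by site_ids.length - s

lemma expandFrom_eq_nil (site_ids : List String) (r s : Nat) (hr : r ≤ s) :
    expandFrom site_ids 0 r s = [] := by
  generalize hm : site_ids.length - s = m
  induction m generalizing s with
  | zero => unfold expandFrom; rw [dif_neg (by omega)]
  | succ m ih =>
      unfold expandFrom
      rw [dif_pos (by omega)]
      have hsr : ¬ s < r := by omega
      simp only [hsr, if_false]
      exact ih (s + 1) (by omega) (by omega)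

lemma length_expandFrom (site_ids : List String) (q r : Nat) (s : Nat) (hr : r ≤ site_ids.length) :
    (expandFrom site_ids q r s).length = (site_ids.length - s) * q + (r - s) := by
  generalize hm : site_ids.length - s = m
  induction m generalizing s with
  | zero =>
      unfold expandFrom; rw [dif_neg (by omega)]
      simp; omega
  | succ m ih =>
      unfold expandFrom
      rw [dif_pos (by omega)]
      rw [List.length_append, List.length_replicate, ih (s + 1) (by omega)]
      rw [Nat.succ_mul]
      split_ifs <;> omega

lemma flatMap_enumerate_eq (site_ids : List String) (base extra : Nat) (s0 : Nat) :
    (PySem.List.enumerate (site_ids.drop s0) (s0 : Int)).flatMap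
        (fun p => List.replicate (base + (if p.1 < (extra : Int) then 1 else 0)) p.2)
      = expandFrom site_ids base extra s0 := by
  generalize hm : site_ids.length - s0 = m
  induction m generalizing s0 with
  | zero =>
      have hd : site_ids.drop s0 = [] := List.drop_eq_nil_of_le (by omega)
      unfold expandFrom
      rw [dif_neg (by omega), hd]
      simp [PySem.List.enumerate_nil]
  | succ m ih =>
      have hlt : s0 < site_ids.length := by omega
      rw [List.drop_eq_getElem_cons hlt, PySem.List.enumerate_cons]
      simp only [List.flatMap_cons]
      unfold expandFrom
      rw [dif_pos hlt]
      congr 1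
      · have h1 : site_ids.getD s0 "" = site_ids[s0] := by
          simp [List.getD, List.getElem?_eq_getElem hlt]
        rw [h1]
        by_cases h : s0 < extra
        · rw [if_pos (by exact_mod_cast h), if_pos h]
        · rw [if_neg (by exact_mod_cast h), if_neg h]
      · rw [show (s0 : Int) + 1 = ((s0 + 1 : Nat) : Int) by push_cast; ring]
        exact ih (s0 + 1) (by omega)

lemma loopA_eq (site_ids : List String) (q r : Nat) :
    ∀ (rest : List (List (String × String))) (s c : Nat),
      (c = 0 ∨ c < q + (if s < r then 1 else 0)) →
      rest.length + c = (q + (if s < r then 1 else 0)) + (expandFrom site_ids q r (s + 1)).length →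
      assignA_loop site_ids q r rest s c =
        List.zipWith (fun subject sid => ((PySem.Dict.mk subject).insert "site_id" sid).items)
          rest (List.replicate ((q + (if s < r then 1 else 0)) - c) (site_ids.getD s "") ++
                expandFrom site_ids q r (s + 1)) := by
  intro rest
  induction rest with
  | nil => intro s c _ _; simp [assignA_loop]
  | cons subject rest ih =>
      intro s c hc hlen
      -- the current site's quota is not yet exhausted
      have hq : c < q + (if s < r then 1 else 0) := by
        rcases hc with rfl | h
        · by_contra h0
          have hz : q + (if s < r then 1 else 0) = 0 := by omega
          have hq0 : q = 0 := by omega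
          have hrs : r ≤ s := by
            by_contra hrs
            simp [show s < r by omega] at hz
          rw [hq0, expandFrom_eq_nil site_ids r (s + 1) (by omega)] at hlen
          simp at hlen
          omega
        · exact h
      rw [show (q + (if s < r then 1 else 0)) - c
            = ((q + (if s < r then 1 else 0)) - (c + 1)) + 1 by omega,
          List.replicate_succ]
      simp only [assignA_loop, List.cons_append, List.zipWith_cons_cons]
      by_cases hmove : q + (if s < r then 1 else 0) ≤ c + 1
      · rw [if_pos hmove]
        have hqc : q + (if s < r then 1 else 0) = c + 1 := by omega
        rw [show (q + (if s < r then 1 else 0)) - (c + 1) = 0 by omega,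
            List.replicate_zero, List.nil_append]
        congr 1
        by_cases hk : s + 1 < site_ids.length
        · have hE : expandFrom site_ids q r (s + 1)
              = List.replicate (q + (if s + 1 < r then 1 else 0)) (site_ids.getD (s + 1) "") ++
                  expandFrom site_ids q r (s + 1 + 1) := by
            conv_lhs => rw [expandFrom]
            rw [dif_pos hk]
          rw [hE]
          have hlen' : rest.length + 0
              = (q + (if s + 1 < r then 1 else 0)) + (expandFrom site_ids q r (s + 1 + 1)).length := by
            rw [hE] at hlen
            simp at hlen ⊢
            omega
          simpa using ih (s + 1) 0 (Or.inl rfl) hlen'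
        · have hE : expandFrom site_ids q r (s + 1) = [] := by
            conv_lhs => rw [expandFrom]
            rw [dif_neg hk]
          rw [hE] at hlen ⊢
          have : rest.length = 0 := by simp at hlen; omega
          rw [List.length_eq_zero_iff] at this
          subst this
          simp [assignA_loop]
      · rw [if_neg hmove]
        congr 1
        exact ih s (c + 1) (Or.inr (by omega)) (by simp only [List.length_cons] at hlen; omega)

-- ===== VERDICT (by name: the statement is the Claim_ definition above) =====
theorem assign_sites_py_spec : Claim_equal_assign_sites_py := by
  intro rl site_ids _ hpre
  unfold Spec_assign_sites_py assign_sites_py assign_sites_py_alt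
  have hk : ¬ site_ids.length = 0 := by
    simpa [List.length_eq_zero_iff] using hpre
  rw [if_neg hk, if_neg hk]
  have hkpos : 0 < site_ids.length := by omega
  set q := rl.length / site_ids.length with hqdef
  set r := rl.length % site_ids.length with hrdef
  have hrk : r < site_ids.length := Nat.mod_lt _ hkpos
  -- B's expanded table is expandFrom … 0
  have hB : (PySem.List.enumerate site_ids 0).flatMap
        (fun p => List.replicate (q + (if p.1 < (r : Int) then 1 else 0)) p.2)
      = expandFrom site_ids q r 0 := by
    have := flatMap_enumerate_eq site_ids q r 0
    simpa using this
  -- unfold expandFrom once at 0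
  have hE0 : expandFrom site_ids q r 0
      = List.replicate ((q + (if 0 < r then 1 else 0)) - 0) (site_ids.getD 0 "") ++
          expandFrom site_ids q r (0 + 1) := by
    conv_lhs => rw [expandFrom]
    rw [dif_pos hkpos]
    simp
  -- total length of the table is rl.length
  have hlen0 : (expandFrom site_ids q r 0).length = rl.length := by
    rw [length_expandFrom site_ids q r 0 (le_of_lt hrk)]
    simp only [Nat.sub_zero]
    have := Nat.div_add_mod rl.length site_ids.length
    rw [hqdef, hrdef]
    omega
  have hmain := loopA_eq site_ids q r rl 0 0 (Or.inl rfl) (by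
    rw [hE0] at hlen0
    simp at hlen0 ⊢
    omega)
  rw [hmain, ← hE0, ← hB]
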